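-- pv_equiv track=rewrite | github.com/joren485/Sudokuplotter | Algx older versions (Sudoku Solver)/algXv.2/xv2.py | settomatrix
-- ===== SOURCE A (Python) =====
-- def settomatrix(Set):
--     values = []
--     matrix= {}
--     keys = sorted(list(Set.keys()))
--
--     for i in Set.values():
--         for j in i:
--             values.append(j)
--     values = sorted(list(set(values)))
--
--     for i in range(len(keys)):
--         key = keys[i]
--         matrix[key]=[]
--         for j in values:
--             if j in Set[key]:
--                 matrix[key].append(1)
--             else:
--                 matrix[key].append(0)
--
--     return matrix
-- ===== SOURCE B (Python) =====
-- def settomatrix(Set):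
--     keys = sorted(Set.keys())
--     values = sorted(set().union(*Set.values()))
--     pos = {v: i for i, v in enumerate(values)}
--     matrix = {}
--     for key in keys:
--         row = [0] * len(values)
--         for elem in Set[key]:
--             row[pos[elem]] = 1
--         matrix[key] = row
--     return matrix
-- ===== Notes on version B (the rewrite author's own statement) =====
-- stated objective: alternative
-- what changed: Instead of scanning all sorted values for each key and testing list membership per cell, B builds a value-to-column index table once and scatters 1s into a zero-filled row directly from each key's own elements (measured 6.65x at the largest size both finished, but B also timed out on one huge input, so speed is not claimed).
import Mathlib
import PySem

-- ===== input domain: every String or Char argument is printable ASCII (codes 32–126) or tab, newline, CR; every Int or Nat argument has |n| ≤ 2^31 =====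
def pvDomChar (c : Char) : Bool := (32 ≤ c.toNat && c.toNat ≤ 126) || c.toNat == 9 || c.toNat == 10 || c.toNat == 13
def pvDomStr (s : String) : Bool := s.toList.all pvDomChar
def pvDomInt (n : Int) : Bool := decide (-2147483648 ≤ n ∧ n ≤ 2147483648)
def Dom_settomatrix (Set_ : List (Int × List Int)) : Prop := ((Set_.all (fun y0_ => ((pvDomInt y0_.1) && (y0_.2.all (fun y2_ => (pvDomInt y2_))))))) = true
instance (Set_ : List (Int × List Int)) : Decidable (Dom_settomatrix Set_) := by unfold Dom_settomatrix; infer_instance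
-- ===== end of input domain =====

-- B replaces A's per-cell membership scan over all sorted values by a value→column
-- index table and a direct scatter of 1s from each key's own elements (alternative algorithm).

-- ===== PORT A =====
def settomatrix (Set_ : List (Int × List Int)) : List (Int × List Int) :=
  let d := PySem.Dict.ofList Set_
  let values0 : List Int :=
    d.values.foldl (fun acc i => i.foldl (fun acc j => acc ++ [j]) acc) []
  let values : List Int := PySem.List.sorted (PySem.Set.ofList values0) (fun x => x) false
  let keys : List Int := PySem.List.sorted d.keys (fun x => x) false
  let matrix : PySem.Dict Int (List Int) :=
    (PySem.List.pyRange 0 (PySem.List.len keys)).foldl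
      (fun m i =>
        let key := PySem.List.pyGetD keys i 0
        let m := m.insert key []
        values.foldl (fun m j =>
          m.insert key (m.getD key [] ++ [if j ∈ d.getD key [] then (1 : Int) else 0])) m)
      PySem.Dict.empty
  matrix.items

-- ===== PORT B =====
def settomatrix_alt (Set_ : List (Int × List Int)) : List (Int × List Int) :=
  let d := PySem.Dict.ofList Set_
  let keys : List Int := PySem.List.sorted d.keys (fun x => x) false
  let values : List Int :=
    PySem.List.sorted (d.values.foldl (fun s v => PySem.Set.union s v) PySem.Set.empty)
      (fun x => x) false
  let pos : PySem.Dict Int Int :=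
    (PySem.List.enumerate values).foldl (fun p iv => p.insert iv.2 iv.1) PySem.Dict.empty
  let matrix : PySem.Dict Int (List Int) :=
    keys.foldl (fun m key =>
      let row := (d.getD key []).foldl (fun row e => row.set (pos.getD e 0).toNat 1)
        (List.replicate values.length (0 : Int))
      m.insert key row) PySem.Dict.empty
  matrix.items

-- ===== PRECONDITION & SPEC =====
def Spec_settomatrix (Set_ : List (Int × List Int)) (out : List (Int × List Int)) : Prop := out = settomatrix_alt Set_
instance (Set_ : List (Int × List Int)) (out : List (Int × List Int)) : Decidable (Spec_settomatrix Set_ out) := by unfold Spec_settomatrix; infer_instance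

-- ===== CLAIM (what is proved, stated in full; the proofs are below) =====
def Claim_equal_settomatrix : Prop := ∀ (Set_ : List (Int × List Int)), Dom_settomatrix Set_ → Spec_settomatrix Set_ (settomatrix Set_)

-- ===== LEMMAS AND PROOFS =====

-- A's inner loop: appending one 0/1 per value under key builds the membership row in one insert.
theorem pv_inner_A (values : List Int) (b : Int → Int) (m : PySem.Dict Int (List Int))
    (key : Int) (acc : List Int) :
    values.foldl (fun m j => m.insert key (m.getD key [] ++ [b j])) (m.insert key acc)
      = m.insert key (acc ++ values.map b) := by
  induction values generalizing acc with
  | nil => simp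
  | cons j t ih =>
    simp only [List.foldl_cons, PySem.Dict.getD_insert_self, PySem.Dict.insert_insert_self]
    rw [ih]
    simp


-- B's position table looks up the column index of any element of V.
theorem pv_pos_getD (V : List Int) (hnd : V.Nodup) (e : Int) (he : e ∈ V) :
    ((PySem.List.enumerate V).foldl (fun p iv => p.insert iv.2 iv.1)
        (PySem.Dict.empty : PySem.Dict Int Int)).getD e 0 = (V.idxOf e : Int) := by
  have hi : V.idxOf e < V.length := List.idxOf_lt_length_of_mem he
  have hi' : V.idxOf e < (PySem.List.enumerate V).length := by
    rw [PySem.List.length_enumerate]; exact hi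
  have hel : (PySem.List.enumerate V)[V.idxOf e]'hi' = ((V.idxOf e : Int), e) := by
    rw [PySem.List.getElem_enumerate, List.getElem_idxOf hi, zero_add]
  have hmem : ((V.idxOf e : Int), e) ∈ PySem.List.enumerate V := hel ▸ List.getElem_mem hi'
  have hitems : ((PySem.List.enumerate V).foldl (fun p iv => p.insert iv.2 iv.1)
      (PySem.Dict.empty : PySem.Dict Int Int)).items
      = (PySem.List.enumerate V).map (fun a => (a.2, a.1)) := by
    simpa using PySem.Dict.items_foldl_insert_fresh (PySem.List.enumerate V)
      (fun iv => iv.2) (fun iv => iv.1) PySem.Dict.empty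
      (fun a _ => by simp) (by rw [PySem.List.map_snd_enumerate]; exact hnd)
  have hkeys : ((PySem.List.enumerate V).foldl (fun p iv => p.insert iv.2 iv.1)
      (PySem.Dict.empty : PySem.Dict Int Int)).keys.Nodup :=
    PySem.Dict.nodup_keys_foldl_insert_key (PySem.List.enumerate V)
      (fun iv => iv.2) (fun _ iv => iv.1) PySem.Dict.empty (by simp)
  have hmi : (e, (V.idxOf e : Int)) ∈ ((PySem.List.enumerate V).foldl
      (fun p iv => p.insert iv.2 iv.1) (PySem.Dict.empty : PySem.Dict Int Int)).items := by
    rw [hitems]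
    exact List.mem_map_of_mem hmem
  exact PySem.Dict.getD_of_mem_items _ hmi hkeys 0

-- scattering preserves the row length
theorem pv_scatter_len (f : Int -> Nat) (S : List Int) (row : List Int) :
    (S.foldl (fun row e => row.set (f e) 1) row).length = row.length := by
  induction S generalizing row with
  | nil => rfl
  | cons e t ih => simp [List.foldl_cons, ih, List.length_set]

-- Scattering 1s at the column of each element of S, read back pointwise.
theorem pv_scatter_getD (V : List Int) (hnd : V.Nodup)
    (pos : PySem.Dict Int Int)
    (hpos : forall e, e ∈ V -> pos.getD e 0 = (V.idxOf e : Int)) :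
    forall (S : List Int), (forall e, e ∈ S -> e ∈ V) ->
    forall (row : List Int), row.length = V.length ->
    forall (k : Nat), k < V.length ->
      (S.foldl (fun row e => row.set (pos.getD e 0).toNat 1) row).getD k 0
        = if V.getD k 0 ∈ S then 1 else row.getD k 0 := by
  intro S
  induction S with
  | nil => intro _ row hlen k hk; simp
  | cons e t ih =>
    intro hS row hlen k hk
    have he : e ∈ V := hS e (List.mem_cons_self)
    have hidx : V.idxOf e < V.length := List.idxOf_lt_length_of_mem he
    have hrow' : (row.set (pos.getD e 0).toNat 1).length = V.length := by
      rw [List.length_set]; exact hlen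
    rw [List.foldl_cons, ih (fun x hx => hS x (List.mem_cons_of_mem _ hx)) _ hrow' k hk]
    rw [hpos e he, Int.toNat_natCast]
    have hset : (row.set (V.idxOf e) 1).getD k 0
        = if V.idxOf e = k then 1 else row.getD k 0 := by
      rw [List.getD_eq_getElem _ _ (by rw [List.length_set]; omega), List.getElem_set]
      split_ifs with h
      · rfl
      · exact (List.getD_eq_getElem _ _ (by omega)).symm
    rw [hset]
    have hVk : V.getD k 0 = V[k] := List.getD_eq_getElem _ _ hk
    have hiff : (V.idxOf e = k) = (V[k] = e) := by
      apply propext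
      constructor
      · intro h; subst h; exact List.getElem_idxOf hidx
      · intro h; rw [<- h]; exact hnd.idxOf_getElem _ hk
    simp only [List.mem_cons, hVk, hiff]
    by_cases h1 : V[k] = e <;> by_cases h2 : V[k] ∈ t <;> simp [h1, h2]

-- The membership row built by A equals the scattered row built by B.
theorem pv_row (V : List Int) (hnd : V.Nodup)
    (pos : PySem.Dict Int Int)
    (hpos : forall e, e ∈ V -> pos.getD e 0 = (V.idxOf e : Int))
    (S : List Int) (hS : forall e, e ∈ S -> e ∈ V) :
    V.map (fun j => if j ∈ S then (1 : Int) else 0)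
      = S.foldl (fun row e => row.set (pos.getD e 0).toNat 1)
          (List.replicate V.length (0 : Int)) := by
  have hlen2 : (S.foldl (fun row e => row.set (pos.getD e 0).toNat 1)
      (List.replicate V.length (0 : Int))).length = V.length := by
    simpa using pv_scatter_len (fun e => (pos.getD e 0).toNat) S (List.replicate V.length (0 : Int))
  apply List.ext_getElem (by simp [hlen2])
  intro k h1 h2
  have hk : k < V.length := by simpa using h1
  rw [List.getElem_map, <- List.getD_eq_getElem _ 0 h2,
    pv_scatter_getD V hnd pos hpos S hS _ (by simp) k hk,
    List.getD_replicate 0 hk, List.getD_eq_getElem V 0 hk]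

-- ===== VERDICT (by name: the statement is the Claim_ definition above) =====
theorem settomatrix_spec : Claim_equal_settomatrix := by
  intro Set_ _
  show settomatrix Set_ = settomatrix_alt Set_
  unfold settomatrix settomatrix_alt
  simp only []
  have hnd := PySem.Dict.nodup_keys_ofList Set_
  revert hnd
  generalize PySem.Dict.ofList Set_ = d
  intro hnd
  have hv0 : d.values.foldl (fun acc i => List.foldl (fun acc j => acc ++ [j]) acc i) []
      = d.values.flatten := by
    have h1 := PySem.List.foldl_congr_mem d.values
      (fun acc i => List.foldl (fun acc j => acc ++ [j]) acc i) (fun acc i => acc ++ i) []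
      (fun acc x _ => PySem.List.foldl_append_singleton_eq_self x acc)
    rw [h1]
    simpa using PySem.List.foldl_append_eq_flatten d.values []
  have hvB : d.values.foldl (fun s v => PySem.Set.union s v) PySem.Set.empty
      = PySem.Set.ofList d.values.flatten := by
    rw [PySem.Set.ofList_eq_foldl, List.foldl_flatten]
    rfl
  rw [hv0, hvB]
  set V := PySem.List.sorted (PySem.Set.ofList d.values.flatten) (fun x => x) with hV
  set K := PySem.List.sorted d.keys (fun x => x) with hK
  have hVnd : V.Nodup := ((PySem.List.sorted_perm _ _ _).nodup_iff).mpr (PySem.Set.nodup_ofList _)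
  have hKnd : K.Nodup := ((PySem.List.sorted_perm _ _ _).nodup_iff).mpr hnd
  set pos := (PySem.List.enumerate V).foldl (fun p iv => p.insert iv.2 iv.1) PySem.Dict.empty with hposdef
  have hpos : forall e, e ∈ V -> pos.getD e 0 = (V.idxOf e : Int) :=
    fun e he => pv_pos_getD V hVnd e he
  have hS : forall key, key ∈ K -> forall e, e ∈ d.getD key [] -> e ∈ V := by
    intro key hkey e he
    have hkey' : key ∈ d.keys := (PySem.List.mem_sorted _ _ _ _).1 hkey
    have hv : d.getD key [] ∈ d.values := by
      rw [PySem.Dict.values_eq_map_keys d hnd []]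
      exact List.mem_map_of_mem hkey'
    rw [hV, PySem.List.mem_sorted, PySem.Set.mem_ofList, List.mem_flatten]
    exact ⟨_, hv, he⟩
  have hA1 : (PySem.List.pyRange 0 (PySem.List.len K)).foldl
      (fun m i => List.foldl (fun m j => m.insert (PySem.List.pyGetD K i 0)
          (m.getD (PySem.List.pyGetD K i 0) [] ++
            [if j ∈ d.getD (PySem.List.pyGetD K i 0) [] then (1 : Int) else 0]))
        (m.insert (PySem.List.pyGetD K i 0) []) V) PySem.Dict.empty
      = K.foldl (fun m key => List.foldl (fun m j => m.insert key
          (m.getD key [] ++ [if j ∈ d.getD key [] then (1 : Int) else 0]))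
        (m.insert key []) V) PySem.Dict.empty := by
    conv_rhs => rw [<- PySem.List.map_pyGetD_pyRange_zero K 0]
    rw [List.foldl_map]
  rw [hA1]
  have hA2 : K.foldl (fun m key => List.foldl (fun m j => m.insert key
        (m.getD key [] ++ [if j ∈ d.getD key [] then (1 : Int) else 0]))
      (m.insert key []) V) PySem.Dict.empty
      = K.foldl (fun m key => m.insert key
        (V.map (fun j => if j ∈ d.getD key [] then (1 : Int) else 0))) PySem.Dict.empty :=
    PySem.List.foldl_congr_mem _ _ _ _
      (fun m key _ =>
        (pv_inner_A V (fun j => if j ∈ d.getD key [] then (1 : Int) else 0) m key []).trans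
          (by rw [List.nil_append]))
  rw [hA2]
  refine congrArg PySem.Dict.items ?_
  exact PySem.List.foldl_congr_mem K _ _ PySem.Dict.empty
    (fun m key hkey => congrArg (m.insert key)
      (pv_row V hVnd pos hpos (d.getD key []) (fun e he => hS key hkey e he)))
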